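-- pv_equiv track=rewrite | github.com/yixiao-wang-20/automatic_detect | Traversal/explore_he/search.py | calculate_possible_max_reward
-- ===== SOURCE A (Python) =====
-- import itertools
--
-- reward_value = {'dep':30000, 'col':15000, 'fee':10, 'pro_M':10}
--
-- def action_ckeck_legal(action, agent, environment, stage):
--     count_du = 0
--     if 'dep-A' in action:
--         count_du += 1
--     if 'col-B' in action:
--         count_du += 1
--     if 'col-M' in action:
--         count_du += 1
--     if count_du > 1:
--         flag = 0
--     else:
--         flag = 1
--     return flag
--
-- def calculate_possible_max_reward(action_available, environment, stage):
--     max_reward = 0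
--     for num in range(len(action_available) + 1):
--         for i in itertools.combinations(action_available, num):
--             action = list(i)
--             if action_ckeck_legal(action, 2, environment, stage):
--                 reward = 0
--                 if 'dep-A' in action:
--                     reward += reward_value['fee']
--                 if 'dep-B' in action:
--                     reward += reward_value['fee']
--                 if 'col-B' in action:
--                     reward += reward_value['fee']
--                 if 'col-M' in action:
--                     reward += reward_value['col']
--                 if reward > max_reward:
--                     max_reward = reward
--     return max_reward
-- ===== SOURCE B (Python) =====
-- def calculate_possible_max_reward(action_available, environment, stage):
--     base = 10 if 'dep-B' in action_available else 0
--     if 'col-M' in action_available: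
--         return base + 15000
--     if 'dep-A' in action_available or 'col-B' in action_available:
--         return base + 10
--     return base
-- ===== Notes on version B (the rewrite author's own statement) =====
-- stated objective: faster
-- what changed: Replaces the exponential enumeration of all action subsets with a direct O(n) rule: the best legal subset always takes 'dep-B' if available plus the single most valuable of the mutually exclusive actions ('col-M' worth 15000, else 'dep-A'/'col-B' worth 10).
import Mathlib
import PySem

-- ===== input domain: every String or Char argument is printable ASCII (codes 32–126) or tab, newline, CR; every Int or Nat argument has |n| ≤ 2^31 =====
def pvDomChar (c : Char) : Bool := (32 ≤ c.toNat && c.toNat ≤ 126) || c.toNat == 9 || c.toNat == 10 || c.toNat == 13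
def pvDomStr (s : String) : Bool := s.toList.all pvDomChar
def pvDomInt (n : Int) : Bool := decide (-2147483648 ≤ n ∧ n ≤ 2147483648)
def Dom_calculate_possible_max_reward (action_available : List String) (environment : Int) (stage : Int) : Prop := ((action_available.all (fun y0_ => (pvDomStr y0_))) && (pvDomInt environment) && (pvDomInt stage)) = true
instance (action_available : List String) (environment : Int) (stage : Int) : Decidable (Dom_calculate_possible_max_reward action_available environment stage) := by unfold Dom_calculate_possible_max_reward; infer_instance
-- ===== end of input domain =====

-- B replaces A's exhaustive O(2^n) subset enumeration with a direct O(n) greedy rule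
-- (take 'dep-B' plus the single best of the mutually exclusive actions); return value only, no side effects.

-- ===== PORT A =====
-- module constant reward_value (dict literal); keys looked up always present, so getD with default 0 is exact
def pvRewardValue : PySem.Dict String Int :=
  PySem.Dict.ofList [("dep", 30000), ("col", 15000), ("fee", 10), ("pro_M", 10)]

def action_ckeck_legal (action : List String) (agent : Int) (environment : Int) (stage : Int) : Int :=
  let count_du : Int := 0
  let count_du := if "dep-A" ∈ action then count_du + 1 else count_du
  let count_du := if "col-B" ∈ action then count_du + 1 else count_du
  let count_du := if "col-M" ∈ action then count_du + 1 else count_du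
  if count_du > 1 then 0 else 1

-- itertools.combinations(xs, r) in Python's emission order (by position, lexicographic)
def pvCombinations : List String → Nat → List (List String)
  | _, 0 => [[]]
  | [], _ + 1 => []
  | x :: xs, r + 1 => (pvCombinations xs r).map (fun c => x :: c) ++ pvCombinations xs (r + 1)

def calculate_possible_max_reward (action_available : List String) (environment : Int) (stage : Int) : Int :=
  (PySem.List.pyRange 0 (PySem.List.len action_available + 1) 1).foldl (fun max_reward num =>
    (pvCombinations action_available num.toNat).foldl (fun max_reward action =>
      if action_ckeck_legal action 2 environment stage ≠ 0 then
        let reward : Int := 0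
        let reward := if "dep-A" ∈ action then reward + pvRewardValue.getD "fee" 0 else reward
        let reward := if "dep-B" ∈ action then reward + pvRewardValue.getD "fee" 0 else reward
        let reward := if "col-B" ∈ action then reward + pvRewardValue.getD "fee" 0 else reward
        let reward := if "col-M" ∈ action then reward + pvRewardValue.getD "col" 0 else reward
        if reward > max_reward then reward else max_reward
      else max_reward) max_reward) 0

-- ===== PORT B =====
def calculate_possible_max_reward_alt (action_available : List String) (environment : Int) (stage : Int) : Int :=
  let base : Int := if "dep-B" ∈ action_available then 10 else 0
  if "col-M" ∈ action_available then base + 15000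
  else if "dep-A" ∈ action_available ∨ "col-B" ∈ action_available then base + 10
  else base

-- ===== PRECONDITION & SPEC =====
def Spec_calculate_possible_max_reward (action_available : List String) (environment : Int) (stage : Int) (out : Int) : Prop := out = calculate_possible_max_reward_alt action_available environment stage
instance (action_available : List String) (environment : Int) (stage : Int) (out : Int) : Decidable (Spec_calculate_possible_max_reward action_available environment stage out) := by unfold Spec_calculate_possible_max_reward; infer_instance

-- ===== CLAIM (what is proved, stated in full; the proofs are below) =====
def Claim_equal_calculate_possible_max_reward : Prop := ∀ (action_available : List String) (environment : Int) (stage : Int), Dom_calculate_possible_max_reward action_available environment stage → Spec_calculate_possible_max_reward action_available environment stage (calculate_possible_max_reward action_available environment stage)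

-- ===== LEMMAS AND PROOFS =====

-- number of mutually exclusive actions present (A's count_du)
def pvCnt (a : List String) : Int :=
  (if "dep-A" ∈ a then 1 else 0) + (if "col-B" ∈ a then 1 else 0) + (if "col-M" ∈ a then 1 else 0)

-- reward of a legal subset
def pvRwd (a : List String) : Int :=
  (if "dep-A" ∈ a then 10 else 0) + (if "dep-B" ∈ a then 10 else 0) +
  (if "col-B" ∈ a then 10 else 0) + (if "col-M" ∈ a then 15000 else 0)

def pvStep (m : Int) (a : List String) : Int := if pvCnt a ≤ 1 then max m (pvRwd a) else m

lemma pvStep_eq (environment stage : Int) :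
    (fun (max_reward : Int) (action : List String) =>
      if action_ckeck_legal action 2 environment stage ≠ 0 then
        let reward : Int := 0
        let reward := if "dep-A" ∈ action then reward + pvRewardValue.getD "fee" 0 else reward
        let reward := if "dep-B" ∈ action then reward + pvRewardValue.getD "fee" 0 else reward
        let reward := if "col-B" ∈ action then reward + pvRewardValue.getD "fee" 0 else reward
        let reward := if "col-M" ∈ action then reward + pvRewardValue.getD "col" 0 else reward
        if reward > max_reward then reward else max_reward
      else max_reward) = pvStep := by
  funext m a
  have hfee : pvRewardValue.getD "fee" 0 = 10 := by decide
  have hcol : pvRewardValue.getD "col" 0 = 15000 := by decide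
  simp only [action_ckeck_legal, pvStep, pvCnt, pvRwd, hfee, hcol]
  split_ifs <;> omega

lemma pv_foldl_foldl_eq_flatMap {α β γ : Type} (l : List α) (g : α → List β)
    (f : γ → β → γ) (init : γ) :
    l.foldl (fun m x => (g x).foldl f m) init = (l.flatMap g).foldl f init := by
  induction l generalizing init with
  | nil => rfl
  | cons x l ih => simp [List.flatMap_cons, List.foldl_append, ih]

lemma pvA_eq_big (avail : List String) (e s : Int) :
    calculate_possible_max_reward avail e s =
      ((List.range (avail.length + 1)).flatMap (fun r => pvCombinations avail r)).foldl pvStep 0 := by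
  unfold calculate_possible_max_reward
  rw [pvStep_eq]
  rw [PySem.List.pyRange_one]
  simp only [PySem.List.len_eq]
  have h1 : (((avail.length : Int) + 1) - 0).toNat = avail.length + 1 := by omega
  rw [h1, List.foldl_map]
  simp only [zero_add, Int.toNat_natCast]
  exact pv_foldl_foldl_eq_flatMap _ _ _ _

lemma pvStep_ge (m : Int) (a : List String) : m ≤ pvStep m a := by
  unfold pvStep; split_ifs with h
  · exact le_max_left _ _
  · exact le_rfl

lemma pv_foldl_ge (L : List (List String)) (m : Int) : m ≤ L.foldl pvStep m := by
  induction L generalizing m with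
  | nil => exact le_rfl
  | cons a L ih => exact le_trans (pvStep_ge m a) (ih _)

lemma pv_foldl_reach (L : List (List String)) (m : Int) (a : List String)
    (ha : a ∈ L) (hl : pvCnt a ≤ 1) : pvRwd a ≤ L.foldl pvStep m := by
  induction L generalizing m with
  | nil => cases ha
  | cons b L ih =>
    rcases List.mem_cons.mp ha with h | h
    · subst h
      refine le_trans ?_ (pv_foldl_ge L (pvStep m a))
      unfold pvStep; rw [if_pos hl]; exact le_max_right _ _
    · exact ih (pvStep m b) h

lemma pv_foldl_cases (L : List (List String)) (m : Int) :
    L.foldl pvStep m = m ∨ ∃ a ∈ L, pvCnt a ≤ 1 ∧ L.foldl pvStep m = pvRwd a := by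
  induction L generalizing m with
  | nil => exact Or.inl rfl
  | cons b L ih =>
    rcases ih (pvStep m b) with h | ⟨a, ha, hc, hv⟩
    · by_cases hl : pvCnt b ≤ 1
      · rcases max_cases m (pvRwd b) with ⟨he, _⟩ | ⟨he, _⟩
        · left; simpa [List.foldl_cons, pvStep, hl, he] using h
        · right; exact ⟨b, List.mem_cons_self, hl, by simpa [List.foldl_cons, pvStep, hl, he] using h⟩
      · left; simpa [List.foldl_cons, pvStep, hl] using h
    · right; exact ⟨a, List.mem_cons_of_mem _ ha, hc, hv⟩

lemma pv_mem_comb_sublist : ∀ (xs : List String) (r : Nat) (a : List String),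
    a ∈ pvCombinations xs r → a.Sublist xs := by
  intro xs
  induction xs with
  | nil =>
    intro r a h
    cases r with
    | zero =>
      simp only [pvCombinations, List.mem_singleton] at h
      subst h; exact List.nil_sublist _
    | succ r => simp [pvCombinations] at h
  | cons x t ih =>
    intro r a h
    cases r with
    | zero =>
      simp only [pvCombinations, List.mem_singleton] at h
      subst h; exact List.nil_sublist _
    | succ r =>
      simp only [pvCombinations, List.mem_append, List.mem_map] at h
      rcases h with ⟨b, hb, rfl⟩ | h
      · exact List.Sublist.cons₂ x (ih r b hb)
      · exact List.Sublist.cons x (ih (r + 1) a h)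

lemma pv_sublist_mem_comb {a xs : List String} (h : a.Sublist xs) :
    a ∈ pvCombinations xs a.length := by
  induction h with
  | slnil => simp [pvCombinations]
  | @cons l₁ l₂ x h ih =>
    cases l₁ with
    | nil => exact List.mem_singleton.mpr rfl
    | cons y ys => exact List.mem_append.mpr (Or.inr ih)
  | @cons₂ l₁ l₂ x h ih =>
    exact List.mem_append.mpr (Or.inl (List.mem_map.mpr ⟨l₁, ih, rfl⟩))

lemma pv_mem_big {a avail : List String} (h : a.Sublist avail) :
    a ∈ (List.range (avail.length + 1)).flatMap (fun r => pvCombinations avail r) := by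
  refine List.mem_flatMap.mpr ⟨a.length, ?_, pv_sublist_mem_comb h⟩
  exact List.mem_range.mpr (Nat.lt_succ_of_le h.length_le)

lemma pv_alt_nonneg (avail : List String) (e s : Int) :
    0 ≤ calculate_possible_max_reward_alt avail e s := by
  simp only [calculate_possible_max_reward_alt]
  split_ifs <;> simp

lemma pv_upper {a avail : List String} (e s : Int) (hsub : a.Sublist avail)
    (hc : pvCnt a ≤ 1) : pvRwd a ≤ calculate_possible_max_reward_alt avail e s := by
  have h1 : "dep-A" ∈ a → "dep-A" ∈ avail := fun h => hsub.subset h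
  have h2 : "dep-B" ∈ a → "dep-B" ∈ avail := fun h => hsub.subset h
  have h3 : "col-B" ∈ a → "col-B" ∈ avail := fun h => hsub.subset h
  have h4 : "col-M" ∈ a → "col-M" ∈ avail := fun h => hsub.subset h
  unfold pvCnt at hc
  unfold pvRwd
  simp only [calculate_possible_max_reward_alt]
  split_ifs <;> simp_all

lemma pv_witness (avail : List String) (e s : Int) :
    ∃ w : List String, w.Sublist avail ∧ pvCnt w ≤ 1 ∧
      pvRwd w = calculate_possible_max_reward_alt avail e s := by
  by_cases hM : "col-M" ∈ avail
  · refine ⟨avail.filter (fun x => x == "dep-B" || x == "col-M"), List.filter_sublist, ?_, ?_⟩ <;>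
      · simp only [pvCnt, pvRwd, calculate_possible_max_reward_alt, List.mem_filter, hM]
        by_cases hB : "dep-B" ∈ avail <;> simp [hB]
  · by_cases hA : "dep-A" ∈ avail
    · refine ⟨avail.filter (fun x => x == "dep-B" || x == "dep-A"), List.filter_sublist, ?_, ?_⟩ <;>
        · simp only [pvCnt, pvRwd, calculate_possible_max_reward_alt, List.mem_filter, hM, hA]
          by_cases hB : "dep-B" ∈ avail <;> simp [hB]
    · by_cases hC : "col-B" ∈ avail
      · refine ⟨avail.filter (fun x => x == "dep-B" || x == "col-B"), List.filter_sublist, ?_, ?_⟩ <;>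
          · simp only [pvCnt, pvRwd, calculate_possible_max_reward_alt, List.mem_filter, hM, hA, hC]
            by_cases hB : "dep-B" ∈ avail <;> simp [hB]
      · refine ⟨avail.filter (fun x => x == "dep-B"), List.filter_sublist, ?_, ?_⟩ <;>
          · simp only [pvCnt, pvRwd, calculate_possible_max_reward_alt, List.mem_filter, hM, hA, hC]
            by_cases hB : "dep-B" ∈ avail <;> simp [hB]

-- ===== VERDICT (by name: the statement is the Claim_ definition above) =====
theorem calculate_possible_max_reward_spec : Claim_equal_calculate_possible_max_reward := by
  intro avail e s _
  show calculate_possible_max_reward avail e s = calculate_possible_max_reward_alt avail e s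
  rw [pvA_eq_big]
  set BIG := (List.range (avail.length + 1)).flatMap (fun r => pvCombinations avail r) with hBIG
  apply le_antisymm
  · rcases pv_foldl_cases BIG 0 with h | ⟨a, ha, hc, hv⟩
    · rw [h]; exact pv_alt_nonneg avail e s
    · rw [hv]
      have hs : a.Sublist avail := by
        rcases List.mem_flatMap.mp (hBIG ▸ ha) with ⟨r, _, hmem⟩
        exact pv_mem_comb_sublist avail r a hmem
      exact pv_upper e s hs hc
  · rcases pv_witness avail e s with ⟨w, hsub, hc, hval⟩
    rw [← hval]
    exact pv_foldl_reach BIG 0 w (pv_mem_big hsub) hc
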